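-- pv_equiv track=rewrite | github.com/Meli0DaZ/TTS_python | algorithm/algorithm_test1.py | continuousSubset
-- ===== SOURCE A (Python) =====
-- def continuousSubset(li):
--     result = []
--     for a in li:
--         result.append([a])
--         if len(result)>1:
--             for b in result:
--                 if int(b[-1]) == int(a)-1:
--                     result.append(b+[a])
--     return result
-- ===== SOURCE B (Python) =====
-- def continuousSubset(li):
--     result = []
--     buckets = {}  # last value -> subsequences ending there, in result order
--     for a in li:
--         news = [[a]] + [b + [a] for b in buckets.get(a - 1, [])]
--         result += news
--         buckets[a] = buckets.get(a, []) + news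
--     return result
-- ===== Notes on version B (the rewrite author's own statement) =====
-- stated objective: faster
-- what changed: Replaces A's inner rescan of the whole growing result list with a dict of subsequences indexed by their last value, so each element only extends its matching bucket.
import Mathlib
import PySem

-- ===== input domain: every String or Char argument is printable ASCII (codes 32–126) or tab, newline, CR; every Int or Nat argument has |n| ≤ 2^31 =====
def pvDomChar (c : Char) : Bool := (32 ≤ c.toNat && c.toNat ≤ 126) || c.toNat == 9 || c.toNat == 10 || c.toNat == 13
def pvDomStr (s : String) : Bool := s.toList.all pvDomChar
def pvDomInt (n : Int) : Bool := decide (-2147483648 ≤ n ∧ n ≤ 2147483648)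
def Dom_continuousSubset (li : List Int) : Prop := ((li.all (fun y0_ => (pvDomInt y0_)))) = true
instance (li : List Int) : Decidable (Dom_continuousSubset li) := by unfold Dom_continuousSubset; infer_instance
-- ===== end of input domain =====

-- B replaces A's inner rescan of the whole growing result with a dict indexed by last value (objective: faster).

-- ===== PORT A =====
-- Python's 'for b in result' iterates the list WHILE it is being appended to, so the
-- queue also receives every element appended during the loop. Every element of result
-- is nonempty, so b[-1] never raises; 'int(b[-1]) == int(a)-1' is pyGet? b (-1) = some (a-1).
def pvInnerA (a : Int) (queue acc : List (List Int)) : List (List Int) :=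
  match queue with
  | [] => acc
  | b :: rest =>
    if PySem.List.pyGet? b (-1) = some (a - 1) then
      pvInnerA a (rest ++ [b ++ [a]]) (acc ++ [b ++ [a]])
    else
      pvInnerA a rest acc
termination_by (queue.countP (fun b => PySem.List.pyGet? b (-1) == some (a - 1)), queue.length)
decreasing_by
  · apply Prod.Lex.left
    simp only [List.countP_cons, List.countP_append,
      PySem.List.pyGet?_neg_one_append_singleton]
    have hne : ¬ ((some a : Option Int) == some (a - 1)) = true := by
      simp; omega
    simp_all
  · apply Prod.Lex.right'
    · simp only [List.countP_cons]; split <;> omega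
    · simp

def continuousSubset (li : List Int) : List (List Int) :=
  li.foldl (fun result a =>
    let result := result ++ [[a]]
    if result.length > 1 then pvInnerA a result result else result) []

-- ===== PORT B =====
def continuousSubset_alt (li : List Int) : List (List Int) :=
  (li.foldl (fun (st : List (List Int) × PySem.Dict Int (List (List Int))) a =>
      let news := [a] :: (st.2.getD (a - 1) []).map (fun b => b ++ [a])
      (st.1 ++ news, st.2.insert a (st.2.getD a [] ++ news)))
    ([], PySem.Dict.empty)).1

-- ===== PRECONDITION & SPEC =====
def Spec_continuousSubset (li : List Int) (out : List (List Int)) : Prop := out = continuousSubset_alt li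
instance (li : List Int) (out : List (List Int)) : Decidable (Spec_continuousSubset li out) := by unfold Spec_continuousSubset; infer_instance

-- ===== CLAIM (what is proved, stated in full; the proofs are below) =====
def Claim_equal_continuousSubset : Prop := ∀ (li : List Int), Dom_continuousSubset li → Spec_continuousSubset li (continuousSubset li)

-- ===== LEMMAS AND PROOFS =====

-- elements appended by the inner loop end in a, which never matches a-1, so the loop
-- is a filter-and-extend of its initial queue
theorem pvInnerA_eq (a : Int) (queue acc : List (List Int)) :
    pvInnerA a queue acc =
      acc ++ (queue.filter (fun b => PySem.List.pyGet? b (-1) == some (a - 1))).map (fun b => b ++ [a]) := by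
  induction queue, acc using pvInnerA.induct a with
  | case1 acc => simp [pvInnerA]
  | case2 acc b rest h ih =>
    rw [pvInnerA, if_pos h, ih]
    have hne : ¬ ((some a : Option Int) == some (a - 1)) = true := by simp; omega
    simp [List.filter_append, PySem.List.pyGet?_neg_one_append_singleton, hne, h]
  | case3 acc b rest h ih =>
    rw [pvInnerA, if_neg h, ih]
    simp [h]

def pvBStep (st : List (List Int) × PySem.Dict Int (List (List Int))) (a : Int) :
    List (List Int) × PySem.Dict Int (List (List Int)) :=
  let news := [a] :: (st.2.getD (a - 1) []).map (fun b => b ++ [a])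
  (st.1 ++ news, st.2.insert a (st.2.getD a [] ++ news))

def pvInv (result : List (List Int)) (d : PySem.Dict Int (List (List Int))) : Prop :=
  ∀ k : Int, d.getD k [] = result.filter (fun b => PySem.List.pyGet? b (-1) == some k)

theorem pvLast_singleton (a : Int) : PySem.List.pyGet? [a] (-1) = some a := by
  simp [PySem.List.pyGet?_neg_one]

theorem pvAstep_eq (a : Int) (result : List (List Int)) (d : PySem.Dict Int (List (List Int)))
    (hInv : pvInv result d) :
    (let r := result ++ [[a]]; if r.length > 1 then pvInnerA a r r else r)
      = (pvBStep (result, d) a).1 := by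
  have hsing : ¬ ((some a : Option Int) == some (a - 1)) = true := by simp; omega
  have hfilter : (result ++ [[a]]).filter (fun b => PySem.List.pyGet? b (-1) == some (a - 1))
      = result.filter (fun b => PySem.List.pyGet? b (-1) == some (a - 1)) := by
    simp [List.filter_append, pvLast_singleton, hsing]
  by_cases hres : result = []
  · subst hres
    simp [pvBStep, pvInv] at hInv ⊢
    exact hInv (a - 1)
  · have hlen : (result ++ [[a]]).length > 1 := by
      rcases result with _ | ⟨x, xs⟩
      · exact absurd rfl hres
      · simp
    simp only [if_pos hlen, pvInnerA_eq, hfilter, pvBStep]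
    rw [hInv (a - 1)]
    simp

theorem pvInv_step (a : Int) (result : List (List Int)) (d : PySem.Dict Int (List (List Int)))
    (hInv : pvInv result d) :
    pvInv (pvBStep (result, d) a).1 (pvBStep (result, d) a).2 := by
  intro k
  simp only [pvBStep, List.filter_append, List.filter_cons]
  rw [PySem.Dict.getD_insert]
  by_cases hk : k = a
  · subst hk
    rw [if_pos rfl, hInv k]
    have hext : ∀ L : List (List Int),
        (L.map (fun b => b ++ [k])).filter (fun b => PySem.List.pyGet? b (-1) == some k)
          = L.map (fun b => b ++ [k]) := by
      intro L
      rw [List.filter_eq_self]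
      intro x hx
      obtain ⟨b, _, rfl⟩ := List.mem_map.mp hx
      simp [PySem.List.pyGet?_neg_one_append_singleton]
    simp [pvLast_singleton, hext]
  · rw [if_neg hk, hInv k]
    have : ∀ L : List (List Int),
        (L.map (fun b => b ++ [a])).filter (fun b => PySem.List.pyGet? b (-1) == some k)
          = [] := by
      intro L
      rw [List.filter_eq_nil_iff]
      intro x hx
      obtain ⟨b, _, rfl⟩ := List.mem_map.mp hx
      simp [PySem.List.pyGet?_neg_one_append_singleton]
      omega
    have hka : ¬ ((some a : Option Int) == some k) = true := by simp; omega
    simp [pvLast_singleton, hka, this]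

theorem pvMain (li : List Int) (result : List (List Int)) (d : PySem.Dict Int (List (List Int)))
    (hInv : pvInv result d) :
    li.foldl (fun result a =>
      let result := result ++ [[a]]
      if result.length > 1 then pvInnerA a result result else result) result
    = (li.foldl pvBStep (result, d)).1 := by
  induction li generalizing result d with
  | nil => simp
  | cons a rest ih =>
    simp only [List.foldl_cons]
    have h1 := pvAstep_eq a result d hInv
    have h2 := pvInv_step a result d hInv
    rw [h1]
    have : pvBStep (result, d) a = ((pvBStep (result, d) a).1, (pvBStep (result, d) a).2) := rfl
    rw [this]
    exact ih _ _ h2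

theorem pvInv_empty : pvInv [] PySem.Dict.empty := by
  intro k
  simp [PySem.Dict.getD, PySem.Dict.get?, PySem.Dict.empty]

-- ===== VERDICT (by name: the statement is the Claim_ definition above) =====
theorem continuousSubset_spec : Claim_equal_continuousSubset := by
  intro li _
  show continuousSubset li = continuousSubset_alt li
  unfold continuousSubset continuousSubset_alt
  rw [pvMain li [] PySem.Dict.empty pvInv_empty]
  rfl
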